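-- pv_equiv track=rewrite | github.com/pikecracker/imperial-probe-droid | swgohhelp.py | get_player_gp_from_roster
-- ===== SOURCE A (Python) =====
-- def get_player_gp_from_roster(roster):
--
-- 	total, char, ship = 0, 0, 0
--
-- 	for unit in roster:
--
-- 		gp = unit['gp']
--
-- 		total += gp
--
-- 		if unit['combatType'] is 1:
-- 			char += gp
--
-- 		if unit['combatType'] is 2:
-- 			ship += gp
--
-- 	return total, char, ship
-- ===== SOURCE B (Python) =====
-- def get_player_gp_from_roster(roster):
-- 	total = sum(unit['gp'] for unit in roster)
-- 	char = sum(unit['gp'] for unit in roster if unit['combatType'] == 1)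
-- 	ship = sum(unit['gp'] for unit in roster if unit['combatType'] == 2)
-- 	return total, char, ship
-- ===== Notes on version B (the rewrite author's own statement) =====
-- stated objective: simpler
-- what changed: Replaces the single interleaved loop maintaining three accumulators by three independent one-line sums over the roster (CPython's small-int cache makes A's 'is 1'/'is 2' equal to '== 1'/'== 2' on int fields, so the values agree).
import Mathlib
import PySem

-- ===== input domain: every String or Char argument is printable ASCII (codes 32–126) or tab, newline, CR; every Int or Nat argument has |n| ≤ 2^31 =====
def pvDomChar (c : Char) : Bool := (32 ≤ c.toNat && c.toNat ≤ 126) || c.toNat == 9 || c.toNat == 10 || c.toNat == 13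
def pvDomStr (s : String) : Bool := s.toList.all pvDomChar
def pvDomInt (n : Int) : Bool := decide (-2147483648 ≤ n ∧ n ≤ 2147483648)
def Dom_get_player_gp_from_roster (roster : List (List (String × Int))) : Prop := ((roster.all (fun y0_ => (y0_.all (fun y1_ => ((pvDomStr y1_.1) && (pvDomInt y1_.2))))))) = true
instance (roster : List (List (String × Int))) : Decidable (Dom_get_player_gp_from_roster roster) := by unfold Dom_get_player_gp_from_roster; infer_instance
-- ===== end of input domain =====

-- B replaces A's single loop with three accumulators by three independent sums over the roster (simpler decomposition).
-- Each Python dict is an association list; unit[k] is the first match (pvLookup), raising KeyError when the key is absent.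
def pvLookup (unit : List (String × Int)) (k : String) : Option Int :=
  (unit.find? (fun p => p.1 == k)).map (·.2)

-- ===== PORT A =====
-- CPython interns small ints, so `unit['combatType'] is 1` (resp. `is 2`) on an int field is exactly `== 1` (`== 2`); ported as equality.
def get_player_gp_from_roster (roster : List (List (String × Int))) : Int × Int × Int :=
  roster.foldl
    (fun acc unit =>
      let (total, char, ship) := acc
      let gp := (pvLookup unit "gp").getD 0
      let total := total + gp
      let char := if (pvLookup unit "combatType").getD 0 = 1 then char + gp else char
      let ship := if (pvLookup unit "combatType").getD 0 = 2 then ship + gp else ship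
      (total, char, ship))
    (0, 0, 0)

-- ===== PORT B =====
def get_player_gp_from_roster_alt (roster : List (List (String × Int))) : Int × Int × Int :=
  ((roster.map (fun unit => (pvLookup unit "gp").getD 0)).sum,
   ((roster.filter (fun unit => (pvLookup unit "combatType").getD 0 = 1)).map
      (fun unit => (pvLookup unit "gp").getD 0)).sum,
   ((roster.filter (fun unit => (pvLookup unit "combatType").getD 0 = 2)).map
      (fun unit => (pvLookup unit "gp").getD 0)).sum)

-- ===== PRECONDITION & SPEC =====
-- Pre_ excludes rosters containing a unit missing the 'gp' or 'combatType' key, on which A raises KeyError.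
def Pre_get_player_gp_from_roster (roster : List (List (String × Int))) : Prop :=
  ∀ unit ∈ roster, (pvLookup unit "gp").isSome ∧ (pvLookup unit "combatType").isSome
instance (roster : List (List (String × Int))) : Decidable (Pre_get_player_gp_from_roster roster) := by
  unfold Pre_get_player_gp_from_roster; infer_instance
def pvWitness_get_player_gp_from_roster : (List (List (String × Int))) :=
  [[("gp", 5), ("combatType", 1)], [("gp", 7), ("combatType", 2)]]
def Spec_get_player_gp_from_roster (roster : List (List (String × Int))) (out : Int × Int × Int) : Prop := out = get_player_gp_from_roster_alt roster
instance (roster : List (List (String × Int))) (out : Int × Int × Int) : Decidable (Spec_get_player_gp_from_roster roster out) := by unfold Spec_get_player_gp_from_roster; infer_instance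

-- ===== CLAIM (what is proved, stated in full; the proofs are below) =====
def Claim_equal_get_player_gp_from_roster : Prop := ∀ (roster : List (List (String × Int))), Dom_get_player_gp_from_roster roster → Pre_get_player_gp_from_roster roster → Spec_get_player_gp_from_roster roster (get_player_gp_from_roster roster)

-- ===== LEMMAS AND PROOFS =====

theorem gp_main (roster : List (List (String × Int))) (t c s : Int) :
    roster.foldl
      (fun acc unit =>
        let (total, char, ship) := acc
        let gp := (pvLookup unit "gp").getD 0
        let total := total + gp
        let char := if (pvLookup unit "combatType").getD 0 = 1 then char + gp else char
        let ship := if (pvLookup unit "combatType").getD 0 = 2 then ship + gp else ship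
        (total, char, ship))
      (t, c, s)
    = (t + (roster.map (fun unit => (pvLookup unit "gp").getD 0)).sum,
       c + ((roster.filter (fun unit => (pvLookup unit "combatType").getD 0 = 1)).map
              (fun unit => (pvLookup unit "gp").getD 0)).sum,
       s + ((roster.filter (fun unit => (pvLookup unit "combatType").getD 0 = 2)).map
              (fun unit => (pvLookup unit "gp").getD 0)).sum) := by
  induction roster generalizing t c s with
  | nil => simp
  | cons u rest ih =>
    simp only [List.foldl_cons, List.map_cons, List.filter_cons, List.sum_cons]
    rw [ih]
    by_cases h1 : (pvLookup u "combatType").getD 0 = 1 <;>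
      by_cases h2 : (pvLookup u "combatType").getD 0 = 2 <;>
      simp [h1, h2, add_assoc]

-- ===== VERDICT (by name: the statement is the Claim_ definition above) =====
theorem get_player_gp_from_roster_spec : Claim_equal_get_player_gp_from_roster := by
  intro roster _ _
  unfold Spec_get_player_gp_from_roster get_player_gp_from_roster get_player_gp_from_roster_alt
  rw [gp_main]
  simp
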